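-- pv_equiv track=rewrite | github.com/guige2023/rabai_autoclick | actions/data_imputer_action.py | _backward_fill
-- ===== SOURCE A (Python) =====
-- from typing import Any, Callable, Optional, Sequence
--
-- def _backward_fill(
--
--     values: list[Any],
--     limit: Optional[int] = None,
-- ) -> list[Any]:
--     """Backward fill missing values."""
--     result = [None] * len(values)
--     next_valid = None
--     fill_count = 0
--
--     for i in range(len(values) - 1, -1, -1):
--         value = values[i]
--         if value is not None:
--             next_valid = value
--             fill_count = 0
--             result[i] = value
--         elif next_valid is not None:
--             if limit is None or fill_count < limit:
--                 result[i] = next_valid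
--                 fill_count += 1
--
--     return result
-- ===== SOURCE B (Python) =====
-- from typing import Any, Optional
--
--
-- def _backward_fill(
--     values: list,
--     limit: Optional[int] = None,
-- ) -> list:
--     """Backward fill missing values: forward pass flushing each None-run when
--     its following valid value is reached (fills the run's tail, nearest the value)."""
--     out = []
--     run = 0  # length of the current pending run of Nones
--     for v in values:
--         if v is None:
--             run += 1
--         else:
--             k = run if limit is None else min(run, max(limit, 0))
--             out.extend([None] * (run - k))
--             out.extend([v] * k)
--             out.append(v)
--             run = 0
--     out.extend([None] * run)  # trailing Nones stay None
--     return out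
-- ===== Notes on version B (the rewrite author's own statement) =====
-- stated objective: alternative
-- what changed: Replaces A's backward index scan with next_valid/fill_count scalars and in-place writes into a preallocated result by a single forward pass that counts each None-run and, at the run's terminating valid value, emits the run's unfilled head, the filled tail and the value by list appends.
import Mathlib
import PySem

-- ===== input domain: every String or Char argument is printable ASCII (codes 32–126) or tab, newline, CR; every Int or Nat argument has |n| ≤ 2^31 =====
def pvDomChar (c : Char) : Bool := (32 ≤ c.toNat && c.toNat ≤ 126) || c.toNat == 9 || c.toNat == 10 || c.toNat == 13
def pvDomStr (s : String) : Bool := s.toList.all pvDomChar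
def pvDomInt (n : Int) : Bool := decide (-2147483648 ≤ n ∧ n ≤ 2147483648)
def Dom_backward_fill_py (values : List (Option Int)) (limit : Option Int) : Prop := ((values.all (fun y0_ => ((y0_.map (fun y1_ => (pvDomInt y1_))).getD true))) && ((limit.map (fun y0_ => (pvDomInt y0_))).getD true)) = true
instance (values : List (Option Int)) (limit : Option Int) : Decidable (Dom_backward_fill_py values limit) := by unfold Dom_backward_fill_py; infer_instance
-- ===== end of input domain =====

-- B replaces the backward scan with scalar state by a forward pass that counts each
-- None-run and flushes it (unfilled head, filled tail, then the value) at its valid value;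
-- same values, a different decomposition (objective: alternative).

-- ===== PORT A =====
-- one loop iteration of A at index i (reads values[i], possibly writes result[i])
def bfStep (values : List (Option Int)) (limit : Option Int)
    (st : List (Option Int) × Option Int × Int) (i : Nat) :
    List (Option Int) × Option Int × Int :=
  let result := st.1
  let next_valid := st.2.1
  let fill_count := st.2.2
  -- values[i]: i is an in-range nonnegative loop index, so plain getD reads it exactly
  match values.getD i none with
  | some x => (result.set i (some x), some x, (0 : Int))
  | none =>
    match next_valid with
    | some nv =>
      if (match limit with | none => true | some l => decide (fill_count < l)) then
        (result.set i (some nv), some nv, fill_count + 1)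
      else st
    | none => st

-- `for i in range(len(values)-1, -1, -1)`: bfLoop n processes i = n-1, n-2, …, 0
def bfLoop (values : List (Option Int)) (limit : Option Int) :
    Nat → (List (Option Int) × Option Int × Int) → List (Option Int) × Option Int × Int
  | 0, st => st
  | Nat.succ i, st => bfLoop values limit i (bfStep values limit st i)

def backward_fill_py (values : List (Option Int)) (limit : Option Int) : List (Option Int) :=
  (bfLoop values limit values.length (List.replicate values.length none, none, 0)).1

-- ===== PORT B =====
-- one loop iteration of B: count a None, or flush the pending run at a valid value
def bfBody (limit : Option Int) (st : List (Option Int) × Int) (v : Option Int) :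
    List (Option Int) × Int :=
  match v with
  | none => (st.1, st.2 + 1)
  | some x =>
    let k : Int := match limit with | none => st.2 | some l => min st.2 (max l 0)
    (st.1 ++ List.replicate (st.2 - k).toNat none ++ List.replicate k.toNat (some x) ++ [some x], 0)

def backward_fill_py_alt (values : List (Option Int)) (limit : Option Int) : List (Option Int) :=
  let st := values.foldl (bfBody limit) ([], 0)
  st.1 ++ List.replicate st.2.toNat none

-- ===== PRECONDITION & SPEC =====
def Spec_backward_fill_py (values : List (Option Int)) (limit : Option Int) (out : List (Option Int)) : Prop := out = backward_fill_py_alt values limit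
instance (values : List (Option Int)) (limit : Option Int) (out : List (Option Int)) : Decidable (Spec_backward_fill_py values limit out) := by unfold Spec_backward_fill_py; infer_instance

-- ===== CLAIM (what is proved, stated in full; the proofs are below) =====
def Claim_equal_backward_fill_py : Prop := ∀ (values : List (Option Int)) (limit : Option Int), Dom_backward_fill_py values limit → Spec_backward_fill_py values limit (backward_fill_py values limit)

-- ===== LEMMAS AND PROOFS =====

-- A's loop as a structural recursion from the right, initial scalars (nv, fc)
def auxA (limit : Option Int) : List (Option Int) → Option Int → Int →
    List (Option Int) × Option Int × Int
  | [], nv, fc => ([], nv, fc)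
  | v :: rest, nv, fc =>
    match auxA limit rest nv fc with
    | (r, nv', fc') =>
      match v with
      | some x => (some x :: r, some x, 0)
      | none =>
        match nv' with
        | some x =>
          if (match limit with | none => true | some l => decide (fc' < l)) then
            (some x :: r, some x, fc' + 1)
          else (none :: r, nv', fc')
        | none => (none :: r, nv', fc')

lemma bfStep_cons (v : Option Int) (rest : List (Option Int)) (limit : Option Int)
    (c : Option Int) (racc : List (Option Int)) (nv : Option Int) (fc : Int) (i : Nat) :
    bfStep (v :: rest) limit (c :: racc, nv, fc) (i + 1)
      = (c :: (bfStep rest limit (racc, nv, fc) i).1,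
         (bfStep rest limit (racc, nv, fc) i).2) := by
  simp only [bfStep, List.getD_cons_succ, List.set_cons_succ]
  cases rest.getD i none with
  | some x => rfl
  | none =>
    cases nv with
    | none => rfl
    | some w =>
      by_cases h : (match limit with | none => true | some l => decide (fc < l)) = true <;>
        simp [h]

lemma bfLoop_cons (v : Option Int) (rest : List (Option Int)) (limit : Option Int) :
    ∀ (m : Nat) (c : Option Int) (racc : List (Option Int)) (nv : Option Int) (fc : Int),
    bfLoop (v :: rest) limit (m + 1) (c :: racc, nv, fc)
      = bfStep (v :: rest) limit
          (c :: (bfLoop rest limit m (racc, nv, fc)).1,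
           (bfLoop rest limit m (racc, nv, fc)).2) 0 := by
  intro m
  induction m with
  | zero => intro c racc nv fc; rfl
  | succ m ih =>
    intro c racc nv fc
    show bfLoop (v :: rest) limit (m + 1) (bfStep (v :: rest) limit (c :: racc, nv, fc) (m + 1)) = _
    rw [bfStep_cons]
    rw [ih]
    rfl

lemma bfLoop_eq_auxA (limit : Option Int) :
    ∀ (values : List (Option Int)) (nv : Option Int) (fc : Int),
    bfLoop values limit values.length (List.replicate values.length none, nv, fc)
      = auxA limit values nv fc := by
  intro values
  induction values with
  | nil => intro nv fc; rfl
  | cons v rest ih =>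
    intro nv fc
    have hlen : (v :: rest).length = rest.length + 1 := rfl
    rw [hlen, List.replicate_succ, bfLoop_cons, ih]
    cases h : auxA limit rest nv fc with
    | mk r p =>
      cases p with
      | mk nv' fc' =>
        simp only [auxA, h]
        cases v with
        | some x => simp [bfStep]
        | none =>
          cases nv' with
          | none => simp [bfStep]
          | some w =>
            by_cases hok : (match limit with | none => true | some l => decide (fc' < l)) = true <;>
              simp [bfStep]

-- the number of Nones of a run of length m that get filled
def kfun (limit : Option Int) (m : Nat) : Nat :=
  match limit with
  | none => m
  | some l => min m l.toNat

lemma auxA_replicate_none (limit : Option Int) (m : Nat) :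
    auxA limit (List.replicate m none) none 0 = (List.replicate m none, none, 0) := by
  induction m with
  | zero => rfl
  | succ m ih => rw [List.replicate_succ]; simp [auxA, ih]

lemma auxA_run (limit : Option Int) (x : Int) (rest : List (Option Int)) :
    ∀ (m : Nat),
    auxA limit (List.replicate m none ++ some x :: rest) none 0
      = (List.replicate (m - kfun limit m) none ++ List.replicate (kfun limit m) (some x)
          ++ some x :: (auxA limit rest none 0).1,
         some x, (kfun limit m : Int)) := by
  intro m
  induction m with
  | zero =>
    cases h : auxA limit rest none 0 with
    | mk r p => cases limit <;> simp [auxA, kfun, h]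
  | succ m ih =>
    rw [List.replicate_succ, List.cons_append]
    simp only [auxA, ih]
    cases limit with
    | none =>
      simp only [kfun]
      simp [List.replicate_succ]
    | some l =>
      simp only [kfun]
      by_cases h : m < l.toNat
      · have hmin : min m l.toNat = m := by omega
        have hmin' : min (m + 1) l.toNat = m + 1 := by omega
        have hok : ((m : Nat) : Int) < l := by omega
        simp only [hmin, hmin', hok, decide_true, if_true, Prod.mk.injEq]
        refine ⟨?_, trivial, by push_cast; ring⟩
        simp [List.replicate_succ]
      · have hmin : min m l.toNat = l.toNat := by omega
        have hmin' : min (m + 1) l.toNat = l.toNat := by omega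
        have hok : ¬ ((l.toNat : Nat) : Int) < l := by omega
        simp only [hmin, hmin', hok, decide_false]
        rw [if_neg (by simp)]
        have hstep : m + 1 - l.toNat = (m - l.toNat) + 1 := by omega
        rw [hstep, List.replicate_succ]
        simp

-- the chunk B emits when flushing a run of `run` Nones at value x
def chunkB (limit : Option Int) (run : Int) (x : Int) : List (Option Int) :=
  let k : Int := match limit with | none => run | some l => min run (max l 0)
  List.replicate (run - k).toNat none ++ List.replicate k.toNat (some x) ++ [some x]

lemma bfBody_none (limit : Option Int) (out : List (Option Int)) (run : Int) :
    bfBody limit (out, run) none = (out, run + 1) := rfl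

lemma bfBody_some (limit : Option Int) (out : List (Option Int)) (run : Int) (x : Int) :
    bfBody limit (out, run) (some x) = (out ++ chunkB limit run x, 0) := by
  cases limit <;> simp [bfBody, chunkB]

-- B's fold only appends to the output component
lemma bfFold_out_append (limit : Option Int) :
    ∀ (vs : List (Option Int)) (out : List (Option Int)) (run : Int),
    vs.foldl (bfBody limit) (out, run)
      = (out ++ (vs.foldl (bfBody limit) ([], run)).1, (vs.foldl (bfBody limit) ([], run)).2) := by
  intro vs
  induction vs with
  | nil => intro out run; simp
  | cons v vs ih =>
    intro out run
    cases v with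
    | none =>
      simp only [List.foldl_cons, bfBody_none]
      exact ih out (run + 1)
    | some x =>
      simp only [List.foldl_cons, bfBody_some, List.nil_append]
      rw [ih (out ++ chunkB limit run x) 0, ih (chunkB limit run x) 0]
      simp [List.append_assoc]

lemma bfFold_replicate_none (limit : Option Int) :
    ∀ (m : Nat) (out : List (Option Int)) (run : Int),
    (List.replicate m none).foldl (bfBody limit) (out, run) = (out, run + m) := by
  intro m
  induction m with
  | zero => intro out run; simp
  | succ m ih =>
    intro out run
    rw [List.replicate_succ]
    simp only [List.foldl_cons, bfBody_none, ih]
    congr 1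
    push_cast
    ring

-- the flushed chunk of a run of m Nones matches A's filled prefix
lemma chunk_eq (limit : Option Int) (m : Nat) (x : Int) :
    chunkB limit (m : Int) x
      = List.replicate (m - kfun limit m) none ++ List.replicate (kfun limit m) (some x) ++ [some x] := by
  cases limit with
  | none => simp [chunkB, kfun]
  | some l =>
    simp only [chunkB, kfun]
    have h1 : ((m : Int) - min (m : Int) (max l 0)).toNat = m - min m l.toNat := by omega
    have h2 : (min (m : Int) (max l 0)).toNat = min m l.toNat := by omega
    rw [h1, h2]

-- every list is all-Nones or a None-run followed by a valid value
lemma decomp (values : List (Option Int)) :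
    (∃ m, values = List.replicate m none) ∨
    (∃ m x rest, values = List.replicate m none ++ some x :: rest) := by
  induction values with
  | nil => exact Or.inl ⟨0, rfl⟩
  | cons v rest ih =>
    cases v with
    | some x => exact Or.inr ⟨0, x, rest, rfl⟩
    | none =>
      cases ih with
      | inl h =>
        obtain ⟨m, hm⟩ := h
        exact Or.inl ⟨m + 1, by rw [hm, List.replicate_succ]⟩
      | inr h =>
        obtain ⟨m, x, r, hm⟩ := h
        exact Or.inr ⟨m + 1, x, r, by rw [hm, List.replicate_succ]; rfl⟩

lemma main_eq (limit : Option Int) :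
    ∀ (n : Nat) (values : List (Option Int)), values.length ≤ n →
    backward_fill_py values limit = backward_fill_py_alt values limit := by
  intro n
  induction n with
  | zero =>
    intro values hlen
    have : values = [] := List.eq_nil_of_length_eq_zero (Nat.le_zero.1 hlen)
    subst this; rfl
  | succ n ih =>
    intro values hlen
    rcases decomp values with ⟨m, hm⟩ | ⟨m, x, rest, hm⟩
    · subst hm
      rw [backward_fill_py, bfLoop_eq_auxA, auxA_replicate_none]
      rw [backward_fill_py_alt]
      simp only [bfFold_replicate_none limit m ([]) 0]
      simp
    · subst hm
      have hlrest : rest.length ≤ n := by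
        simp only [List.length_append, List.length_replicate, List.length_cons] at hlen
        omega
      have hA : (auxA limit rest none 0).1 = backward_fill_py_alt rest limit := by
        rw [← ih rest hlrest, backward_fill_py, bfLoop_eq_auxA]
      have e1 : (List.replicate m none ++ some x :: rest).foldl (bfBody limit) ([], 0)
          = rest.foldl (bfBody limit) (chunkB limit (m : Int) x, 0) := by
        rw [List.foldl_append, bfFold_replicate_none limit m ([]) 0]
        simp only [List.foldl_cons, bfBody_some, List.nil_append]
        norm_num
      rw [backward_fill_py, bfLoop_eq_auxA, auxA_run]
      rw [backward_fill_py_alt]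
      simp only [e1]
      rw [bfFold_out_append limit rest (chunkB limit (m : Int) x) 0]
      simp only [chunk_eq]
      simp only [backward_fill_py_alt] at hA
      simp [List.append_assoc, hA]

-- ===== VERDICT (by name: the statement is the Claim_ definition above) =====
theorem backward_fill_py_spec : Claim_equal_backward_fill_py := by
  intro values limit _
  unfold Spec_backward_fill_py
  exact main_eq limit values.length values (le_refl _)
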